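-- pv_equiv track=rewrite | github.com/boompig/pyCatan | catan_tk.py | get_hex_row
-- ===== SOURCE A (Python) =====
-- def get_hex_coords(x_0, y_0, minor_horiz_dist, major_horiz_dist, minor_vert_dist):
-- 	'''Given certain parameters for the hexagon, return tuple of vertices for hexagon.'''
--
-- 	# TODO move under class
--
-- 	return (
-- 		(x_0, y_0),
-- 		(x_0 + minor_horiz_dist, y_0 + minor_vert_dist),
-- 		(x_0 + minor_horiz_dist + major_horiz_dist, y_0 + minor_vert_dist),
-- 		(x_0 + 2 * minor_horiz_dist + major_horiz_dist, y_0),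
-- 		(x_0 + minor_horiz_dist + major_horiz_dist, y_0 - minor_vert_dist),
-- 		(x_0 + minor_horiz_dist, y_0 - minor_vert_dist),
-- 	)
--
-- def get_hex_row(x_0, y_0, minor_horiz_dist, major_horiz_dist, minor_vert_dist, num):
-- 	'''Return list of hex row coordinates. num is the number of hexes in this row.'''
--
-- 	# TODO move under class
--
-- 	hexes = []
--
-- 	for i in range(num):
-- 		if len(hexes) > 0:
-- 			x_0, y_0 = hexes[-1][3]
-- 			x_0 += major_horiz_dist
--
-- 		hexes.append(get_hex_coords(x_0, y_0, minor_horiz_dist, major_horiz_dist, minor_vert_dist))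
-- 	return hexes
-- ===== SOURCE B (Python) =====
-- def get_hex_coords(x_0, y_0, minor_horiz_dist, major_horiz_dist, minor_vert_dist):
-- 	return (
-- 		(x_0, y_0),
-- 		(x_0 + minor_horiz_dist, y_0 + minor_vert_dist),
-- 		(x_0 + minor_horiz_dist + major_horiz_dist, y_0 + minor_vert_dist),
-- 		(x_0 + 2 * minor_horiz_dist + major_horiz_dist, y_0),
-- 		(x_0 + minor_horiz_dist + major_horiz_dist, y_0 - minor_vert_dist),
-- 		(x_0 + minor_horiz_dist, y_0 - minor_vert_dist),
-- 	)
--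
-- def get_hex_row(x_0, y_0, minor_horiz_dist, major_horiz_dist, minor_vert_dist, num):
-- 	'''Closed form: hexagon i sits at x_0 + i * pitch; no dependence on previous hexes.'''
-- 	pitch = 2 * minor_horiz_dist + 2 * major_horiz_dist
-- 	return [
-- 		get_hex_coords(x_0 + i * pitch, y_0, minor_horiz_dist, major_horiz_dist, minor_vert_dist)
-- 		for i in range(num)
-- 	]
-- ===== Notes on version B (the rewrite author's own statement) =====
-- stated objective: alternative
-- what changed: B replaces A's sequential loop (each hexagon's origin read back from the previous hexagon's stored fourth vertex) by a closed-form index formula x_0 + i * (2*minor + 2*major), computing every hexagon independently in a comprehension; exact on the integer domain of this claim.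
import Mathlib
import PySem

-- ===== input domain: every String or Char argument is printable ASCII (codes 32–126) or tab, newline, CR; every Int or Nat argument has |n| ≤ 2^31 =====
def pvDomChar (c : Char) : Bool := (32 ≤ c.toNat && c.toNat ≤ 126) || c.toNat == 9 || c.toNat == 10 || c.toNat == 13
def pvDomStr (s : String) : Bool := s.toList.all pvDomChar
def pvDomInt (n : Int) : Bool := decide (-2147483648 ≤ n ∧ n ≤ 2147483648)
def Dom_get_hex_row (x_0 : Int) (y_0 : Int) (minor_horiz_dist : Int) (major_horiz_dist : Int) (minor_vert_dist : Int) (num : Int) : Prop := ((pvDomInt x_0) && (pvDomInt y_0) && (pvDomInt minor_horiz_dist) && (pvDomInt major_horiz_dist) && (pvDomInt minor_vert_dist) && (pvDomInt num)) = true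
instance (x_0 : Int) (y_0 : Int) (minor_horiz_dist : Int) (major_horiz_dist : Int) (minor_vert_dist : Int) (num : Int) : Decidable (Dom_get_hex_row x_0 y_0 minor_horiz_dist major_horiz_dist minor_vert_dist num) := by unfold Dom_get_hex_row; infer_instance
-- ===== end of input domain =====

-- B replaces A's sequential loop (origin read back from the previous hexagon's stored
-- fourth vertex) by a closed-form index formula x_0 + i*(2*minor + 2*major) in a
-- comprehension; exact on the integer domain of this claim.

abbrev Hex := (Int × Int) × (Int × Int) × (Int × Int) × (Int × Int) × (Int × Int) × (Int × Int)

-- ===== PORT A =====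
def get_hex_coords (x_0 y_0 minor_horiz_dist major_horiz_dist minor_vert_dist : Int) : Hex :=
  ( (x_0, y_0),
    (x_0 + minor_horiz_dist, y_0 + minor_vert_dist),
    (x_0 + minor_horiz_dist + major_horiz_dist, y_0 + minor_vert_dist),
    (x_0 + 2 * minor_horiz_dist + major_horiz_dist, y_0),
    (x_0 + minor_horiz_dist + major_horiz_dist, y_0 - minor_vert_dist),
    (x_0 + minor_horiz_dist, y_0 - minor_vert_dist) )

def get_hex_row (x_0 : Int) (y_0 : Int) (minor_horiz_dist : Int) (major_horiz_dist : Int) (minor_vert_dist : Int) (num : Int) : List Hex :=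
  (PySem.List.pyRange 0 num 1).foldl (fun hexes _ =>
    let xy : Int × Int :=
      if hexes.length > 0 then
        match PySem.List.pyGet? hexes (-1) with
        | some h => (h.2.2.2.1.1 + major_horiz_dist, h.2.2.2.1.2)
        | none => (x_0, y_0)  -- unreachable under the length guard
      else (x_0, y_0)
    hexes ++ [get_hex_coords xy.1 xy.2 minor_horiz_dist major_horiz_dist minor_vert_dist]) []

-- ===== PORT B =====
def get_hex_row_alt (x_0 : Int) (y_0 : Int) (minor_horiz_dist : Int) (major_horiz_dist : Int) (minor_vert_dist : Int) (num : Int) : List Hex :=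
  let pitch := 2 * minor_horiz_dist + 2 * major_horiz_dist
  (PySem.List.pyRange 0 num 1).map (fun i =>
    get_hex_coords (x_0 + i * pitch) y_0 minor_horiz_dist major_horiz_dist minor_vert_dist)

-- manual DecidableEq for the 6-fold vertex product (instance search does not reach this depth)
def pvDecEqProd {α β : Type} (da : DecidableEq α) (db : DecidableEq β) : DecidableEq (α × β) :=
  fun a b => @instDecidableEqProd α β da db a b
def pvDecEqHex : DecidableEq Hex :=
  pvDecEqProd inferInstance (pvDecEqProd inferInstance (pvDecEqProd inferInstance
    (pvDecEqProd inferInstance (pvDecEqProd inferInstance inferInstance))))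

-- ===== PRECONDITION & SPEC =====
def Spec_get_hex_row (x_0 : Int) (y_0 : Int) (minor_horiz_dist : Int) (major_horiz_dist : Int) (minor_vert_dist : Int) (num : Int) (out : List ((Int × Int) × (Int × Int) × (Int × Int) × (Int × Int) × (Int × Int) × (Int × Int))) : Prop := out = get_hex_row_alt x_0 y_0 minor_horiz_dist major_horiz_dist minor_vert_dist num
instance (x_0 : Int) (y_0 : Int) (minor_horiz_dist : Int) (major_horiz_dist : Int) (minor_vert_dist : Int) (num : Int) (out : List ((Int × Int) × (Int × Int) × (Int × Int) × (Int × Int) × (Int × Int) × (Int × Int))) : Decidable (Spec_get_hex_row x_0 y_0 minor_horiz_dist major_horiz_dist minor_vert_dist num out) := by unfold Spec_get_hex_row; exact @List.hasDecEq _ pvDecEqHex _ _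

-- ===== CLAIM (what is proved, stated in full; the proofs are below) =====
def Claim_equal_get_hex_row : Prop := ∀ (x_0 : Int) (y_0 : Int) (minor_horiz_dist : Int) (major_horiz_dist : Int) (minor_vert_dist : Int) (num : Int), Dom_get_hex_row x_0 y_0 minor_horiz_dist major_horiz_dist minor_vert_dist num → Spec_get_hex_row x_0 y_0 minor_horiz_dist major_horiz_dist minor_vert_dist num (get_hex_row x_0 y_0 minor_horiz_dist major_horiz_dist minor_vert_dist num)

-- ===== LEMMAS AND PROOFS =====

-- intermediate positional form of A's loop: run of n hexagons from a cursor
def rowGo (cur_x cur_y minor_horiz_dist major_horiz_dist minor_vert_dist : Int) : Nat → List Hex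
  | 0 => []
  | n + 1 =>
    get_hex_coords cur_x cur_y minor_horiz_dist major_horiz_dist minor_vert_dist ::
      rowGo ((cur_x + 2 * minor_horiz_dist + major_horiz_dist) + major_horiz_dist) cur_y
        minor_horiz_dist major_horiz_dist minor_vert_dist n

-- the cursor of A's next iteration, expressed from A's accumulator state
def cursorOf (x_0 y_0 major_horiz_dist : Int) (acc : List Hex) : Int × Int :=
  match acc.getLast? with
  | none => (x_0, y_0)
  | some h => (h.2.2.2.1.1 + major_horiz_dist, h.2.2.2.1.2)

-- A's fold from any accumulator = accumulator ++ run from the corresponding cursor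
lemma fold_eq_rowGo (x_0 y_0 a b c : Int) (l : List Int) (acc : List Hex) :
    l.foldl (fun hexes _ =>
      let xy : Int × Int :=
        if hexes.length > 0 then
          match PySem.List.pyGet? hexes (-1) with
          | some h => (h.2.2.2.1.1 + b, h.2.2.2.1.2)
          | none => (x_0, y_0)
        else (x_0, y_0)
      hexes ++ [get_hex_coords xy.1 xy.2 a b c]) acc
    = acc ++ rowGo (cursorOf x_0 y_0 b acc).1 (cursorOf x_0 y_0 b acc).2 a b c l.length := by
  induction l generalizing acc with
  | nil => simp [rowGo]
  | cons e t ih =>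
    simp only [List.foldl_cons, List.length_cons]
    rw [ih]
    by_cases hacc : acc = []
    · subst hacc
      simp [cursorOf, rowGo, get_hex_coords]
    · have hlen : 0 < acc.length := List.length_pos_iff.mpr hacc
      have hglast : ∃ h, acc.getLast? = some h := by
        cases hg : acc.getLast? with
        | none => exact absurd (List.getLast?_eq_none_iff.mp hg) hacc
        | some h => exact ⟨h, rfl⟩
      obtain ⟨h, hg⟩ := hglast
      simp only [hlen, if_pos, PySem.List.pyGet?_neg_one acc, hg, cursorOf]
      rw [List.getLast?_append]
      simp [rowGo, get_hex_coords, List.append_assoc]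

-- the sequential run equals the closed-form map
lemma rowGo_eq_map (cy a b c : Int) (n : Nat) : ∀ (cx : Int),
    rowGo cx cy a b c n
      = (List.range n).map (fun (k : Nat) => get_hex_coords (cx + (k : Int) * (2 * a + 2 * b)) cy a b c) := by
  induction n with
  | zero => intro cx; simp [rowGo]
  | succ m ih =>
    intro cx
    rw [List.range_succ_eq_map]
    simp only [List.map_cons, List.map_map, rowGo, ih]
    refine congrArg₂ _ ?_ ?_
    · simp
    · apply List.map_congr_left
      intro k _
      simp only [Function.comp_apply]
      congr 1
      push_cast
      ring

theorem get_hex_row_spec : Claim_equal_get_hex_row := by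
  intro x_0 y_0 a b c num _
  unfold Spec_get_hex_row get_hex_row get_hex_row_alt
  rw [fold_eq_rowGo]
  simp only [List.nil_append, cursorOf, List.getLast?_nil, PySem.List.length_pyRange_one,
    Int.sub_zero]
  rw [rowGo_eq_map, PySem.List.pyRange_one, List.map_map]
  simp only [Int.sub_zero]
  apply List.map_congr_left
  intro k _
  simp only [Function.comp_apply, Int.zero_add]
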